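-- pv_equiv track=rewrite | github.com/mmh132/ProjectEuler | solves/P132.py | checkten
-- ===== SOURCE A (Python) =====
-- def checkten(n):
--     ctr5 = 0
--     ctr2 = 0
--     while n%5 == 0 and ctr5 < 9:
--         n//=5
--         ctr5+=1
--     while n%2 == 0 and ctr2 < 9:
--         n//=2
--         ctr2+=1
--     return n == 1
-- ===== SOURCE B (Python) =====
-- def checkten(n):
--     # n passes exactly when it is a positive divisor of 10**9 = 2**9 * 5**9
--     return n > 0 and 10**9 % n == 0
-- ===== Notes on version B (the rewrite author's own statement) =====
-- stated objective: simpler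
-- what changed: Replaced the two bounded factor-stripping division loops with a closed-form divisibility test: n is accepted iff it is a positive divisor of 10**9 = 2^9*5^9.
import Mathlib
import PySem

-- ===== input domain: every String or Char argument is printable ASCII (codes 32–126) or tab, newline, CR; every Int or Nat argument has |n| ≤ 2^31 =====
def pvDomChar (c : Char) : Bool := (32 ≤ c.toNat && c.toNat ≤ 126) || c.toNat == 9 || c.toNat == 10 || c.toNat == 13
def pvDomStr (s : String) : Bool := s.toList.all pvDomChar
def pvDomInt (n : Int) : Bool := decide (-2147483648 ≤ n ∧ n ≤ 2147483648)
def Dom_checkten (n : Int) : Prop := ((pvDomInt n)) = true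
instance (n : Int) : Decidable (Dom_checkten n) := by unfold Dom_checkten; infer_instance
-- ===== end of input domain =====

-- B replaces A's two bounded division loops with the closed-form test "n is a positive divisor of 10^9" (objective: simpler).

-- ===== PORT A =====
-- while n%5 == 0 and ctr5 < 9: n//=5; ctr5+=1   (recursion on the remaining fuel 9 - ctr5)
def checktenLoop5 (n : Int) (ctr5 : Nat) : Int :=
  if PySem.Int.mod n 5 = 0 ∧ ctr5 < 9 then checktenLoop5 (PySem.Int.floordiv n 5) (ctr5 + 1) else n
termination_by 9 - ctr5

-- while n%2 == 0 and ctr2 < 9: n//=2; ctr2+=1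
def checktenLoop2 (n : Int) (ctr2 : Nat) : Int :=
  if PySem.Int.mod n 2 = 0 ∧ ctr2 < 9 then checktenLoop2 (PySem.Int.floordiv n 2) (ctr2 + 1) else n
termination_by 9 - ctr2

def checkten (n : Int) : Bool :=
  checktenLoop2 (checktenLoop5 n 0) 0 == 1

-- ===== PORT B =====
-- return n > 0 and 10**9 % n == 0   (short-circuit 'and')
def checkten_alt (n : Int) : Bool :=
  if 0 < n then PySem.Int.mod (10 ^ 9) n == 0 else false

-- ===== PRECONDITION & SPEC =====
def Spec_checkten (n : Int) (out : Bool) : Prop := out = checkten_alt n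
instance (n : Int) (out : Bool) : Decidable (Spec_checkten n out) := by unfold Spec_checkten; infer_instance

-- ===== CLAIM (what is proved, stated in full; the proofs are below) =====
def Claim_equal_checkten : Prop := ∀ (n : Int), Dom_checkten n → Spec_checkten n (checkten n)

-- ===== LEMMAS AND PROOFS =====

-- any run of the 5-loop divides out an exact power of 5
theorem checktenLoop5_decompose (ctr5 : Nat) (n : Int) :
    ∃ a : Nat, a ≤ 9 - ctr5 ∧ n = 5 ^ a * checktenLoop5 n ctr5 := by
  induction h : 9 - ctr5 generalizing n ctr5 with
  | zero =>
      refine ⟨0, by omega, ?_⟩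
      rw [checktenLoop5]
      rw [if_neg (fun hc => absurd hc.2 (by omega))]
      ring
  | succ k ih =>
      by_cases hc : PySem.Int.mod n 5 = 0 ∧ ctr5 < 9
      · have hdvd : (5 : Int) ∣ n := (PySem.Int.mod_eq_zero_iff_dvd n 5).mp hc.1
        have h5n : n = 5 * PySem.Int.floordiv n 5 := by
          obtain ⟨m, hm⟩ := hdvd
          rw [hm, PySem.Int.floordiv_eq_ediv_of_pos (by norm_num),
            Int.mul_ediv_cancel_left m (by norm_num)]
        obtain ⟨a, ha, heq⟩ := ih (ctr5 + 1) (PySem.Int.floordiv n 5) (by omega)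
        refine ⟨a + 1, by omega, ?_⟩
        rw [checktenLoop5, if_pos hc]
        calc n = 5 * PySem.Int.floordiv n 5 := h5n
          _ = 5 * (5 ^ a * checktenLoop5 (PySem.Int.floordiv n 5) (ctr5 + 1)) := by rw [← heq]
          _ = 5 ^ (a + 1) * checktenLoop5 (PySem.Int.floordiv n 5) (ctr5 + 1) := by ring
      · refine ⟨0, by omega, ?_⟩
        rw [checktenLoop5, if_neg hc]
        ring

theorem checktenLoop2_decompose (ctr2 : Nat) (n : Int) :
    ∃ b : Nat, b ≤ 9 - ctr2 ∧ n = 2 ^ b * checktenLoop2 n ctr2 := by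
  induction h : 9 - ctr2 generalizing n ctr2 with
  | zero =>
      refine ⟨0, by omega, ?_⟩
      rw [checktenLoop2]
      rw [if_neg (fun hc => absurd hc.2 (by omega))]
      ring
  | succ k ih =>
      by_cases hc : PySem.Int.mod n 2 = 0 ∧ ctr2 < 9
      · have hdvd : (2 : Int) ∣ n := (PySem.Int.mod_eq_zero_iff_dvd n 2).mp hc.1
        have h2n : n = 2 * PySem.Int.floordiv n 2 := by
          obtain ⟨m, hm⟩ := hdvd
          rw [hm, PySem.Int.floordiv_eq_ediv_of_pos (by norm_num),
            Int.mul_ediv_cancel_left m (by norm_num)]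
        obtain ⟨b, hb, heq⟩ := ih (ctr2 + 1) (PySem.Int.floordiv n 2) (by omega)
        refine ⟨b + 1, by omega, ?_⟩
        rw [checktenLoop2, if_pos hc]
        calc n = 2 * PySem.Int.floordiv n 2 := h2n
          _ = 2 * (2 ^ b * checktenLoop2 (PySem.Int.floordiv n 2) (ctr2 + 1)) := by rw [← heq]
          _ = 2 ^ (b + 1) * checktenLoop2 (PySem.Int.floordiv n 2) (ctr2 + 1) := by ring
      · refine ⟨0, by omega, ?_⟩
        rw [checktenLoop2, if_neg hc]
        ring

-- the 5-loop strips an exact power of 5 down to a 5-free core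
theorem checktenLoop5_strip (a ctr5 : Nat) (m : Int) (hm : ¬ (5 : Int) ∣ m)
    (hle : a + ctr5 ≤ 9) : checktenLoop5 (5 ^ a * m) ctr5 = m := by
  induction a generalizing ctr5 with
  | zero =>
      rw [checktenLoop5]
      have : ¬ PySem.Int.mod (5 ^ 0 * m) 5 = 0 := by
        rw [PySem.Int.mod_eq_zero_iff_dvd]; simpa using hm
      rw [if_neg (by tauto)]; ring
  | succ a ih =>
      rw [checktenLoop5]
      have hdvd : (5 : Int) ∣ 5 ^ (a + 1) * m := ⟨5 ^ a * m, by ring⟩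
      have hmod : PySem.Int.mod (5 ^ (a + 1) * m) 5 = 0 :=
        (PySem.Int.mod_eq_zero_iff_dvd _ 5).mpr hdvd
      rw [if_pos ⟨hmod, by omega⟩]
      have hfd : PySem.Int.floordiv (5 ^ (a + 1) * m) 5 = 5 ^ a * m := by
        rw [PySem.Int.floordiv_eq_ediv_of_pos (by norm_num), pow_succ,
          (by ring : 5 ^ a * 5 * m = 5 ^ a * m * 5), Int.mul_ediv_cancel _ (by norm_num)]
      rw [hfd]
      exact ih (ctr5 + 1) (by omega)

theorem checktenLoop2_strip (b ctr2 : Nat) (m : Int) (hm : ¬ (2 : Int) ∣ m)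
    (hle : b + ctr2 ≤ 9) : checktenLoop2 (2 ^ b * m) ctr2 = m := by
  induction b generalizing ctr2 with
  | zero =>
      rw [checktenLoop2]
      have : ¬ PySem.Int.mod (2 ^ 0 * m) 2 = 0 := by
        rw [PySem.Int.mod_eq_zero_iff_dvd]; simpa using hm
      rw [if_neg (by tauto)]; ring
  | succ b ih =>
      rw [checktenLoop2]
      have hdvd : (2 : Int) ∣ 2 ^ (b + 1) * m := ⟨2 ^ b * m, by ring⟩
      have hmod : PySem.Int.mod (2 ^ (b + 1) * m) 2 = 0 :=
        (PySem.Int.mod_eq_zero_iff_dvd _ 2).mpr hdvd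
      rw [if_pos ⟨hmod, by omega⟩]
      have hfd : PySem.Int.floordiv (2 ^ (b + 1) * m) 2 = 2 ^ b * m := by
        rw [PySem.Int.floordiv_eq_ediv_of_pos (by norm_num), pow_succ,
          (by ring : 2 ^ b * 2 * m = 2 ^ b * m * 2), Int.mul_ediv_cancel _ (by norm_num)]
      rw [hfd]
      exact ih (ctr2 + 1) (by omega)

theorem checkten_true_iff (n : Int) :
    checkten n = true ↔ ∃ a b : Nat, a ≤ 9 ∧ b ≤ 9 ∧ n = 5 ^ a * 2 ^ b := by
  constructor
  · intro h
    unfold checkten at h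
    obtain ⟨a, ha, ha'⟩ := checktenLoop5_decompose 0 n
    obtain ⟨b, hb, hb'⟩ := checktenLoop2_decompose 0 (checktenLoop5 n 0)
    have h1 : checktenLoop2 (checktenLoop5 n 0) 0 = 1 := by
      simpa using h
    rw [h1, mul_one] at hb'
    exact ⟨a, b, by omega, by omega, by rw [ha', hb']⟩
  · rintro ⟨a, b, ha, hb, rfl⟩
    unfold checkten
    have h5 : checktenLoop5 (5 ^ a * 2 ^ b) 0 = 2 ^ b := by
      apply checktenLoop5_strip a 0 _ _ (by omega)
      intro hdvd
      have := Int.Prime.dvd_pow' (p := 5) (n := 2) (by norm_num) hdvd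
      norm_num at this
    rw [h5]
    have h2 : checktenLoop2 (2 ^ b) 0 = 1 := by
      have := checktenLoop2_strip b 0 1 (by norm_num) (by omega)
      simpa using this
    rw [h2]
    rfl

theorem checkten_alt_true_iff (n : Int) :
    checkten_alt n = true ↔ 0 < n ∧ n ∣ 10 ^ 9 := by
  unfold checkten_alt
  by_cases h : 0 < n
  · rw [if_pos h]
    simp only [beq_iff_eq, PySem.Int.mod_eq_zero_iff_dvd]
    exact ⟨fun hd => ⟨h, hd⟩, fun hd => hd.2⟩
  · rw [if_neg h]
    simp [h]

-- a positive divisor of 10^9 is 5^a * 2^b with a, b ≤ 9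
theorem pos_dvd_ten_pow (n : Int) (hpos : 0 < n) (hdvd : n ∣ 10 ^ 9) :
    ∃ a b : Nat, a ≤ 9 ∧ b ≤ 9 ∧ n = 5 ^ a * 2 ^ b := by
  have hnat : n.toNat ∣ (10 ^ 9 : Nat) := by
    have : (n.toNat : Int) ∣ (10 ^ 9 : Int) := by
      rwa [Int.toNat_of_nonneg hpos.le]
    exact_mod_cast this
  rw [(by norm_num : (10 ^ 9 : Nat) = 5 ^ 9 * 2 ^ 9)] at hnat
  obtain ⟨u, v, hu, hv, huv⟩ := dvd_mul.mp hnat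
  obtain ⟨a, ha, rfl⟩ := (Nat.dvd_prime_pow (by norm_num)).mp hu
  obtain ⟨b, hb, rfl⟩ := (Nat.dvd_prime_pow (by norm_num)).mp hv
  refine ⟨a, b, ha, hb, ?_⟩
  have : n = (n.toNat : Int) := (Int.toNat_of_nonneg hpos.le).symm
  rw [this, huv]
  push_cast
  ring

-- ===== VERDICT (by name: the statement is the Claim_ definition above) =====
theorem checkten_spec : Claim_equal_checkten := by
  intro n _
  unfold Spec_checkten
  rw [Bool.eq_iff_iff, checkten_true_iff, checkten_alt_true_iff]
  constructor
  · rintro ⟨a, b, ha, hb, rfl⟩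
    constructor
    · positivity
    · rw [(by norm_num : (10 ^ 9 : Int) = 5 ^ 9 * 2 ^ 9)]
      exact mul_dvd_mul (pow_dvd_pow 5 ha) (pow_dvd_pow 2 hb)
  · rintro ⟨hpos, hdvd⟩
    exact pos_dvd_ten_pow n hpos hdvd
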